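-- pv_equiv track=rewrite | github.com/jtdub/jtdub.com | scripts/optimize_images.py | generate_alt_text
-- ===== SOURCE A (Python) =====
-- def generate_alt_text(src_url, context=""):
--     """Generate meaningful alt text based on image URL and context"""
--     if 'imagedelivery.net' in src_url:
--         # These are likely photography/documentation images
--         if 'spring-lake' in context.lower():
--             return "Underwater scene at Spring Lake"
--         elif 'blue-lagoon' in context.lower():
--             return "Underwater diving scene at Blue Lagoon"
--         elif 'sibinacocha' in context.lower():
--             return "High-altitude lake Sibinacocha in Peru"
--         elif any(word in context.lower() for word in ['cisco', 'router', 'network', 'mpls', 'ospf']):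
--             return "Network diagram or configuration screenshot"
--         elif 'grub' in context.lower():
--             return "Boot menu configuration screenshot"
--         else:
--             return "Image related to the article content"
--     else:
--         return "Illustration or diagram"
-- ===== SOURCE B (Python) =====
-- _KEYWORD_PRIORITY = {
--     'spring-lake': 0,
--     'blue-lagoon': 1,
--     'sibinacocha': 2,
--     'cisco': 3, 'router': 3, 'network': 3, 'mpls': 3, 'ospf': 3,
--     'grub': 4,
-- }
--
-- _MESSAGES = [
--     "Underwater scene at Spring Lake",
--     "Underwater diving scene at Blue Lagoon",
--     "High-altitude lake Sibinacocha in Peru",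
--     "Network diagram or configuration screenshot",
--     "Boot menu configuration screenshot",
--     "Image related to the article content",
-- ]
--
-- def generate_alt_text(src_url, context=""):
--     """Generate meaningful alt text based on image URL and context"""
--     if 'imagedelivery.net' not in src_url:
--         return "Illustration or diagram"
--     ctx = context.lower()
--     best = min((p for kw, p in _KEYWORD_PRIORITY.items() if kw in ctx), default=5)
--     return _MESSAGES[best]
-- ===== Notes on version B (the rewrite author's own statement) =====
-- stated objective: alternative
-- what changed: Instead of an early-return if/elif chain, B collects the priorities of all matching keywords from a keyword->priority dict in one pass, takes the minimum (default 5), and indexes a message table; the elif precedence becomes a min over priorities.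
import Mathlib
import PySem

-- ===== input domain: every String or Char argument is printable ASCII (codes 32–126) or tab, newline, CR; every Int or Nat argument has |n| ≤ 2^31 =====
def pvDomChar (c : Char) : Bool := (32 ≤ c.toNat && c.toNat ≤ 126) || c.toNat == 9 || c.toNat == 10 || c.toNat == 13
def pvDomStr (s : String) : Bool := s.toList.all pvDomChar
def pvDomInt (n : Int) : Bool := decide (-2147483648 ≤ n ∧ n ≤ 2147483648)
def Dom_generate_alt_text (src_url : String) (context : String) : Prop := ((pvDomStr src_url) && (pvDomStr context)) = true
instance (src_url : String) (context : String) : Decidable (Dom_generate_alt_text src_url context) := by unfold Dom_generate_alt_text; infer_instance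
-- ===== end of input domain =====

-- B replaces A's early-return if/elif chain with a min-priority computation over a keyword->priority table, then indexes a message list (alternative decomposition).


-- ===== PORT A =====
def generate_alt_text (src_url : String) (context : String) : String :=
  if PySem.Str.isIn "imagedelivery.net" src_url then
    if PySem.Str.isIn "spring-lake" (PySem.Str.lower context) then
      "Underwater scene at Spring Lake"
    else if PySem.Str.isIn "blue-lagoon" (PySem.Str.lower context) then
      "Underwater diving scene at Blue Lagoon"
    else if PySem.Str.isIn "sibinacocha" (PySem.Str.lower context) then
      "High-altitude lake Sibinacocha in Peru"
    else if ["cisco", "router", "network", "mpls", "ospf"].any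
        (fun word => PySem.Str.isIn word (PySem.Str.lower context)) then
      "Network diagram or configuration screenshot"
    else if PySem.Str.isIn "grub" (PySem.Str.lower context) then
      "Boot menu configuration screenshot"
    else
      "Image related to the article content"
  else
    "Illustration or diagram"

-- ===== PORT B =====
def kwPriority : List (String × Nat) :=
  [ ("spring-lake", 0), ("blue-lagoon", 1), ("sibinacocha", 2),
    ("cisco", 3), ("router", 3), ("network", 3), ("mpls", 3), ("ospf", 3),
    ("grub", 4) ]

def altMessages : List String :=
  [ "Underwater scene at Spring Lake",
    "Underwater diving scene at Blue Lagoon",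
    "High-altitude lake Sibinacocha in Peru",
    "Network diagram or configuration screenshot",
    "Boot menu configuration screenshot",
    "Image related to the article content" ]

def generate_alt_text_alt (src_url : String) (context : String) : String :=
  if !(PySem.Str.isIn "imagedelivery.net" src_url) then
    "Illustration or diagram"
  else
    let ctx := PySem.Str.lower context
    -- min over the priorities of matching keywords, default 5 (Python's min(..., default=5))
    let best := kwPriority.foldl (fun b kp => if PySem.Str.isIn kp.1 ctx then min b kp.2 else b) 5
    altMessages.getD best "Image related to the article content"

-- ===== PRECONDITION & SPEC =====
def Spec_generate_alt_text (src_url : String) (context : String) (out : String) : Prop := out = generate_alt_text_alt src_url context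
instance (src_url : String) (context : String) (out : String) : Decidable (Spec_generate_alt_text src_url context out) := by unfold Spec_generate_alt_text; infer_instance

-- ===== CLAIM (what is proved, stated in full; the proofs are below) =====
def Claim_equal_generate_alt_text : Prop := ∀ (src_url : String) (context : String), Dom_generate_alt_text src_url context → Spec_generate_alt_text src_url context (generate_alt_text src_url context)

-- ===== LEMMAS AND PROOFS =====

-- ===== VERDICT (by name: the statement is the Claim_ definition above) =====
theorem generate_alt_text_spec : Claim_equal_generate_alt_text := by
  intro src_url context _
  unfold Spec_generate_alt_text generate_alt_text generate_alt_text_alt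
  simp only [kwPriority, altMessages, List.foldl, List.any_cons, List.any_nil,
    Bool.or_false]
  generalize PySem.Str.isIn "imagedelivery.net" src_url = g0
  generalize PySem.Str.isIn "spring-lake" (PySem.Str.lower context) = g1
  generalize PySem.Str.isIn "blue-lagoon" (PySem.Str.lower context) = g2
  generalize PySem.Str.isIn "sibinacocha" (PySem.Str.lower context) = g3
  generalize PySem.Str.isIn "cisco" (PySem.Str.lower context) = g4
  generalize PySem.Str.isIn "router" (PySem.Str.lower context) = g5
  generalize PySem.Str.isIn "network" (PySem.Str.lower context) = g6
  generalize PySem.Str.isIn "mpls" (PySem.Str.lower context) = g7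
  generalize PySem.Str.isIn "ospf" (PySem.Str.lower context) = g8
  generalize PySem.Str.isIn "grub" (PySem.Str.lower context) = g9
  cases g0 <;> cases g1 <;> cases g2 <;> cases g3 <;> cases g4 <;> cases g5 <;>
    cases g6 <;> cases g7 <;> cases g8 <;> cases g9 <;> rfl
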